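-- pv_equiv track=rewrite | github.com/NetSPI/OCInferno | ocinferno/core/utils/module_helpers.py | filter_cli_args
-- ===== SOURCE A (Python) =====
-- from typing import Any, Dict, List, Optional
--
-- def filter_cli_args(argv: List[str], allowed_flags: set[str]) -> List[str]:
--     """Filter argv to only include flags that exist in allowed_flags (and their values)."""
--     out: List[str] = []
--     i = 0
--     while i < len(argv):
--         tok = argv[i]
--         if tok.startswith("--"):
--             flag = tok.split("=", 1)[0]
--             if flag in allowed_flags:
--                 out.append(tok)
--                 if "=" not in tok and i + 1 < len(argv):
--                     nxt = argv[i + 1]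
--                     if not str(nxt).startswith("--"):
--                         out.append(nxt)
--                         i += 1
--             else:
--                 if "=" not in tok and i + 1 < len(argv):
--                     nxt = argv[i + 1]
--                     if not str(nxt).startswith("--"):
--                         i += 1
--         i += 1
--     return out
-- ===== SOURCE B (Python) =====
-- from typing import List
--
-- def _parse_units(argv):
--     """Group argv into (flag_token, optional_value) units; drop stray non-flag tokens."""
--     units = []
--     i = 0
--     n = len(argv)
--     while i < n:
--         tok = argv[i]
--         if tok.startswith("--"):
--             val = None
--             if "=" not in tok and i + 1 < n and not argv[i + 1].startswith("--"):
--                 val = argv[i + 1]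
--                 i += 1
--             units.append((tok, val))
--         i += 1
--     return units
--
-- def filter_cli_args(argv: List[str], allowed_flags: "set[str]") -> List[str]:
--     out: List[str] = []
--     for tok, val in _parse_units(argv):
--         if tok.split("=", 1)[0] in allowed_flags:
--             out.append(tok)
--             if val is not None:
--                 out.append(val)
--     return out
-- ===== Notes on version B (the rewrite author's own statement) =====
-- stated objective: alternative
-- what changed: Replaces A's single interleaved while-loop (which mixes value-consumption and allowed-flag selection) by two distinct passes: a parser that groups argv into (flag, optional value) units, then a selector that emits units whose flag is allowed.
import Mathlib
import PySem

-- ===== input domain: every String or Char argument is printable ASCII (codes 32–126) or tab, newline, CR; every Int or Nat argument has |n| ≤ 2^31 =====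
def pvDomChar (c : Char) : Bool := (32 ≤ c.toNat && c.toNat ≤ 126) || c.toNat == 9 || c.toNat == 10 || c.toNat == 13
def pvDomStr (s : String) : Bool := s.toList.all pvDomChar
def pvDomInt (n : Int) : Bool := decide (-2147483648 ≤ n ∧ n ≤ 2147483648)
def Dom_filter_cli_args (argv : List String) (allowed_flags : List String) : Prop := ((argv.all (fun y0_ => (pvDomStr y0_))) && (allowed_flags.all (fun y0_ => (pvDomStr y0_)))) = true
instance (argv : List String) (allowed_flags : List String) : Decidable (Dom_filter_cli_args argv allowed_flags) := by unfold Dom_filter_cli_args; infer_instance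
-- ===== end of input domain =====

-- B replaces A's single interleaved while-loop by two passes (parse into (flag, value?) units, then select allowed units); return values agree everywhere.

-- tok.split("=", 1)[0] — splitMax? is some (sep "=" ≠ "") and nonempty, defaults unreachable
def pvFlagOf (tok : String) : String := ((PySem.Str.splitMax? tok "=" 1).getD []).headD ""

-- ===== PORT A =====
-- A's while-loop: i advances by 1, or by 2 when a value token is consumed; transcribed as recursion on the remaining suffix with the out accumulator
def filterLoopA (allowed_flags : List String) (argv : List String) (out : List String) : List String :=
  match argv with
  | [] => out
  | tok :: rest =>
    if PySem.Str.startswith tok "--" then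
      if PySem.Set.contains allowed_flags (pvFlagOf tok) then
        if PySem.Str.isIn "=" tok = false then
          match rest with
          | nxt :: rest2 =>
            if PySem.Str.startswith nxt "--" = false then
              filterLoopA allowed_flags rest2 (out ++ [tok, nxt])
            else filterLoopA allowed_flags (nxt :: rest2) (out ++ [tok])
          | [] => filterLoopA allowed_flags [] (out ++ [tok])
        else filterLoopA allowed_flags rest (out ++ [tok])
      else
        if PySem.Str.isIn "=" tok = false then
          match rest with
          | nxt :: rest2 =>
            if PySem.Str.startswith nxt "--" = false then
              filterLoopA allowed_flags rest2 out
            else filterLoopA allowed_flags (nxt :: rest2) out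
          | [] => filterLoopA allowed_flags [] out
        else filterLoopA allowed_flags rest out
    else filterLoopA allowed_flags rest out
termination_by argv.length
decreasing_by all_goals (simp; try omega)

def filter_cli_args (argv : List String) (allowed_flags : List String) : List String :=
  filterLoopA allowed_flags argv []

-- ===== PORT B =====
-- first pass: group into (flag token, optional value) units, dropping stray non-flag tokens
def pvParseUnits (argv : List String) : List (String × Option String) :=
  match argv with
  | [] => []
  | tok :: rest =>
    if PySem.Str.startswith tok "--" then
      if PySem.Str.isIn "=" tok = false then
        match rest with
        | nxt :: rest2 =>
          if PySem.Str.startswith nxt "--" = false then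
            (tok, some nxt) :: pvParseUnits rest2
          else (tok, none) :: pvParseUnits (nxt :: rest2)
        | [] => (tok, none) :: pvParseUnits []
      else (tok, none) :: pvParseUnits rest
    else pvParseUnits rest
termination_by argv.length
decreasing_by all_goals (simp; try omega)

-- second pass: keep units whose flag part is allowed
def pvSelectUnits (allowed_flags : List String) (units : List (String × Option String)) : List String :=
  match units with
  | [] => []
  | (tok, val) :: rest =>
    if PySem.Set.contains allowed_flags (pvFlagOf tok) then
      tok :: ((match val with | some v => [v] | none => []) ++ pvSelectUnits allowed_flags rest)
    else pvSelectUnits allowed_flags rest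

def filter_cli_args_alt (argv : List String) (allowed_flags : List String) : List String :=
  pvSelectUnits allowed_flags (pvParseUnits argv)

-- ===== PRECONDITION & SPEC =====
def Spec_filter_cli_args (argv : List String) (allowed_flags : List String) (out : List String) : Prop := out = filter_cli_args_alt argv allowed_flags
instance (argv : List String) (allowed_flags : List String) (out : List String) : Decidable (Spec_filter_cli_args argv allowed_flags out) := by unfold Spec_filter_cli_args; infer_instance

-- ===== CLAIM (what is proved, stated in full; the proofs are below) =====
def Claim_equal_filter_cli_args : Prop := ∀ (argv : List String) (allowed_flags : List String), Dom_filter_cli_args argv allowed_flags → Spec_filter_cli_args argv allowed_flags (filter_cli_args argv allowed_flags)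

-- ===== LEMMAS AND PROOFS =====
lemma filterLoopA_eq (allowed_flags : List String) :
    ∀ n (argv : List String), argv.length ≤ n → ∀ out,
      filterLoopA allowed_flags argv out = out ++ pvSelectUnits allowed_flags (pvParseUnits argv) := by
  intro n
  induction n with
  | zero =>
    intro argv h out
    have : argv = [] := List.eq_nil_of_length_eq_zero (Nat.le_zero.mp h)
    subst this
    simp [filterLoopA, pvParseUnits, pvSelectUnits]
  | succ n ih =>
    intro argv h out
    match argv with
    | [] => simp [filterLoopA, pvParseUnits, pvSelectUnits]
    | [tok] =>
      cases hs : PySem.Chars.startswith tok.toList ['-', '-'] <;>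
        cases he : PySem.Chars.isIn ['='] tok.toList <;>
          simp [filterLoopA, pvParseUnits, pvSelectUnits, hs, he] <;>
            (by_cases hc : pvFlagOf tok ∈ allowed_flags <;> simp [hc])
    | tok :: nxt :: rest2 =>
      have h1 : (nxt :: rest2).length ≤ n := by simp at h ⊢; omega
      have h2 : rest2.length ≤ n := by simp at h ⊢; omega
      cases hs : PySem.Chars.startswith tok.toList ['-', '-']
      · simp [filterLoopA, pvParseUnits, hs, ih (nxt :: rest2) h1]
      · cases he : PySem.Chars.isIn ['='] tok.toList
        · cases hn : PySem.Chars.startswith nxt.toList ['-', '-']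
          · simp [filterLoopA, pvParseUnits, pvSelectUnits, hs, he, hn, ih rest2 h2]
            by_cases hc : pvFlagOf tok ∈ allowed_flags <;> simp [hc]
          · simp [filterLoopA, pvParseUnits, pvSelectUnits, hs, he, hn,
              ih (nxt :: rest2) h1]
            by_cases hc : pvFlagOf tok ∈ allowed_flags <;> simp [hc]
        · simp [filterLoopA, pvParseUnits, pvSelectUnits, hs, he, ih (nxt :: rest2) h1]
          by_cases hc : pvFlagOf tok ∈ allowed_flags <;> simp [hc]

-- ===== VERDICT (by name: the statement is the Claim_ definition above) =====
theorem filter_cli_args_spec : Claim_equal_filter_cli_args := by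
  intro argv allowed_flags _
  unfold Spec_filter_cli_args filter_cli_args filter_cli_args_alt
  simpa using filterLoopA_eq allowed_flags argv.length argv le_rfl []
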